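-- pv_equiv track=rewrite | github.com/JoschkaCBraun/adaptive-text-steering | src/experiments/anthropic_evals/generate_paper_plots/stability_of_steering_vector_direction_under_subsampling.py | parse_scenario_base
-- ===== SOURCE A (Python) =====
-- def parse_scenario_base(raw_name: str):
--     """
--     Given a base scenario name like 'pre_m_instr_m_5shot', strip out all '_m'/'_nm'
--     and see which set of tokens remain among {'pre','instr','5shot'}.
--     Then return one of:
--       'pre', 'instr', '5shot',
--       'pre_instr', 'pre_5shot', 'instr_5shot', 'pre_instr_5shot'
--     or None if it doesn't match.
--     """
--     # Remove all occurrences of "_m" or "_nm" (repeatedly, in case they appear multiple times)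
--     tmp = raw_name
--     for _ in range(10):
--         tmp = tmp.replace("_m", "")
--         tmp = tmp.replace("_nm", "")
--     # Now tmp might be something like 'pre_instr_5shot' or 'pre' etc.
--     tokens = [t for t in tmp.split("_") if t]  # split and remove empties
--
--     # Ensure tokens are among the expected ones.
--     unique_tokens = set(tokens)
--     for tok in unique_tokens:
--         if tok not in {"pre", "instr", "5shot"}:
--             return None  # unrecognized scenario
--
--     # Determine which of the 7 valid combinations we have
--     if unique_tokens == {"pre"}:
--         return "pre"
--     elif unique_tokens == {"instr"}:
--         return "instr"
--     elif unique_tokens == {"5shot"}: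
--         return "5shot"
--     elif unique_tokens == {"pre", "instr"}:
--         return "pre_instr"
--     elif unique_tokens == {"pre", "5shot"}:
--         return "pre_5shot"
--     elif unique_tokens == {"instr", "5shot"}:
--         return "instr_5shot"
--     elif unique_tokens == {"pre", "instr", "5shot"}:
--         return "pre_instr_5shot"
--     else:
--         return None
-- ===== SOURCE B (Python) =====
-- def parse_scenario_base(raw_name: str):
--     # Same cleanup and tokenisation as the original (kept verbatim for exactness).
--     tmp = raw_name
--     for _ in range(10):
--         tmp = tmp.replace("_m", "")
--         tmp = tmp.replace("_nm", "")
--     tokens = [t for t in tmp.split("_") if t]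
--     # Reject any unknown token, then build the canonical ordered name directly
--     # instead of enumerating the 7 combinations.
--     if not all(t in ("pre", "instr", "5shot") for t in tokens):
--         return None
--     parts = [c for c in ("pre", "instr", "5shot") if c in tokens]
--     return "_".join(parts) if parts else None
-- ===== Notes on version B (the rewrite author's own statement) =====
-- stated objective: simpler
-- what changed: Replaces A's seven-branch if/elif over set equalities with a single validity check plus a constructive build: filter the three canonical keywords by membership in the token list and join the survivors with underscores; the cleanup/tokenisation prefix is kept verbatim.
import Mathlib
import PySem

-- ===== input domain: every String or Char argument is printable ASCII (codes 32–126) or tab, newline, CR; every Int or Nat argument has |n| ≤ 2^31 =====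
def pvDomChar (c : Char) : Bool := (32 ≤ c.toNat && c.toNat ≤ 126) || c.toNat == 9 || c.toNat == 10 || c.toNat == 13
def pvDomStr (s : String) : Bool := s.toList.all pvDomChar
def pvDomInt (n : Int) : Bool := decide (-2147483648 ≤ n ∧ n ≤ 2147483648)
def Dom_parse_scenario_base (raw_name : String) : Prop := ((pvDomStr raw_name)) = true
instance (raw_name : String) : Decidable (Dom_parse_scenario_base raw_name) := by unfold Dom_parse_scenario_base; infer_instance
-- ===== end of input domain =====

-- B replaces A's 7-branch if/elif over set equalities by an ordered constructive join; objective: simpler.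

-- Shared prefix (verbatim identical lines in both Pythons): the repeated "_m"/"_nm"
-- cleanup loop and the token split dropping empty pieces.
def pvClean (raw_name : String) : List String :=
  let tmp := (List.range 10).foldl (fun s _ =>
      PySem.Str.replace (PySem.Str.replace s "_m" "") "_nm" "") raw_name
  ((PySem.Str.split? tmp "_").getD []).filter (fun t => !(t == ""))

-- ===== PORT A =====
def parse_scenario_base (raw_name : String) : Option String :=
  let tokens := pvClean raw_name
  let unique : PySem.Set String := PySem.Set.ofList tokens
  -- 'for tok in unique_tokens: if tok not in {...}: return None' — order-independent, as all
  if unique.all (fun tok => (["pre", "instr", "5shot"] : List String).contains tok) then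
    if PySem.Set.equal unique (PySem.Set.ofList ["pre"]) then some "pre"
    else if PySem.Set.equal unique (PySem.Set.ofList ["instr"]) then some "instr"
    else if PySem.Set.equal unique (PySem.Set.ofList ["5shot"]) then some "5shot"
    else if PySem.Set.equal unique (PySem.Set.ofList ["pre", "instr"]) then some "pre_instr"
    else if PySem.Set.equal unique (PySem.Set.ofList ["pre", "5shot"]) then some "pre_5shot"
    else if PySem.Set.equal unique (PySem.Set.ofList ["instr", "5shot"]) then some "instr_5shot"
    else if PySem.Set.equal unique (PySem.Set.ofList ["pre", "instr", "5shot"]) then some "pre_instr_5shot"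
    else none
  else none

-- ===== PORT B =====
def parse_scenario_base_alt (raw_name : String) : Option String :=
  let tokens := pvClean raw_name
  if tokens.all (fun t => (["pre", "instr", "5shot"] : List String).contains t) then
    let parts := (["pre", "instr", "5shot"] : List String).filter (fun c => tokens.contains c)
    if parts.isEmpty then none else some (PySem.Str.join "_" parts)
  else none

-- ===== PRECONDITION & SPEC =====
def Spec_parse_scenario_base (raw_name : String) (out : Option String) : Prop := out = parse_scenario_base_alt raw_name
instance (raw_name : String) (out : Option String) : Decidable (Spec_parse_scenario_base raw_name out) := by unfold Spec_parse_scenario_base; infer_instance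

-- ===== CLAIM (what is proved, stated in full; the proofs are below) =====
def Claim_equal_parse_scenario_base : Prop := ∀ (raw_name : String), Dom_parse_scenario_base raw_name → Spec_parse_scenario_base raw_name (parse_scenario_base raw_name)

-- ===== LEMMAS AND PROOFS =====

-- Python set equality, characterised on token lists all of whose members are among the three keywords.
lemma pv_equal_char {L : List String} (h : ∀ x ∈ L, x = "pre" ∨ x = "instr" ∨ x = "5shot")
    (t : List String) (ht : ∀ x ∈ t, x = "pre" ∨ x = "instr" ∨ x = "5shot") :
    PySem.Set.equal (PySem.Set.ofList L) (PySem.Set.ofList t) =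
      (decide (("pre" ∈ L ↔ "pre" ∈ t) ∧ ("instr" ∈ L ↔ "instr" ∈ t) ∧ ("5shot" ∈ L ↔ "5shot" ∈ t))) := by
  by_cases hc : ("pre" ∈ L ↔ "pre" ∈ t) ∧ ("instr" ∈ L ↔ "instr" ∈ t) ∧ ("5shot" ∈ L ↔ "5shot" ∈ t)
  · rw [decide_eq_true hc, PySem.Set.equal_iff]
    intro x
    simp only [PySem.Set.mem_ofList]
    obtain ⟨h1, h2, h3⟩ := hc
    constructor
    · intro hx; rcases h x hx with rfl | rfl | rfl
      exacts [h1.mp hx, h2.mp hx, h3.mp hx]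
    · intro hx; rcases ht x hx with rfl | rfl | rfl
      exacts [h1.mpr hx, h2.mpr hx, h3.mpr hx]
  · simp only [hc, decide_false]
    rw [Bool.eq_false_iff]
    intro he
    rw [PySem.Set.equal_iff] at he
    simp only [PySem.Set.mem_ofList] at he
    exact hc ⟨he "pre", he "instr", he "5shot"⟩

-- The two tails agree for every token list L.
lemma pv_tails_eq (L : List String) :
    (let unique : PySem.Set String := PySem.Set.ofList L
     if unique.all (fun tok => (["pre", "instr", "5shot"] : List String).contains tok) then
       if PySem.Set.equal unique (PySem.Set.ofList ["pre"]) then some "pre"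
       else if PySem.Set.equal unique (PySem.Set.ofList ["instr"]) then some "instr"
       else if PySem.Set.equal unique (PySem.Set.ofList ["5shot"]) then some "5shot"
       else if PySem.Set.equal unique (PySem.Set.ofList ["pre", "instr"]) then some "pre_instr"
       else if PySem.Set.equal unique (PySem.Set.ofList ["pre", "5shot"]) then some "pre_5shot"
       else if PySem.Set.equal unique (PySem.Set.ofList ["instr", "5shot"]) then some "instr_5shot"
       else if PySem.Set.equal unique (PySem.Set.ofList ["pre", "instr", "5shot"]) then some "pre_instr_5shot"
       else none
     else none)
    =
    (if L.all (fun t => (["pre", "instr", "5shot"] : List String).contains t) then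
       let parts := (["pre", "instr", "5shot"] : List String).filter (fun c => L.contains c)
       if parts.isEmpty then none else some (PySem.Str.join "_" parts)
     else none) := by
  by_cases h : ∀ x ∈ L, x = "pre" ∨ x = "instr" ∨ x = "5shot"
  · have hall1 : (PySem.Set.ofList L).all
        (fun tok => (["pre", "instr", "5shot"] : List String).contains tok) = true := by
      simp only [List.all_eq_true, PySem.Set.mem_ofList]
      intro x hx; rcases h x hx with rfl | rfl | rfl <;> decide
    have hall2 : L.all (fun t => (["pre", "instr", "5shot"] : List String).contains t) = true := by
      simp only [List.all_eq_true]
      intro x hx; rcases h x hx with rfl | rfl | rfl <;> decide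
    simp only [hall1, hall2, if_true]
    rw [pv_equal_char h ["pre"] (by simp), pv_equal_char h ["instr"] (by simp),
        pv_equal_char h ["5shot"] (by simp), pv_equal_char h ["pre", "instr"] (by simp),
        pv_equal_char h ["pre", "5shot"] (by simp), pv_equal_char h ["instr", "5shot"] (by simp),
        pv_equal_char h ["pre", "instr", "5shot"] (by simp)]
    by_cases hp : "pre" ∈ L <;> by_cases hi : "instr" ∈ L <;> by_cases hf : "5shot" ∈ L <;>
      simp [hp, hi, hf, List.filter] <;> decide
  · push Not at h
    obtain ⟨x, hx, hx1⟩ := h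
    have hcond : ¬ ∀ y ∈ L, y = "pre" ∨ y = "instr" ∨ y = "5shot" := by
      intro hall
      rcases hall x hx with rfl | rfl | rfl
      exacts [hx1.1 rfl, hx1.2.1 rfl, hx1.2.2 rfl]
    simp [hcond]

-- ===== VERDICT (by name: the statement is the Claim_ definition above) =====
theorem parse_scenario_base_spec : Claim_equal_parse_scenario_base := by
  intro raw_name _
  unfold Spec_parse_scenario_base parse_scenario_base parse_scenario_base_alt
  exact pv_tails_eq (pvClean raw_name)
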